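-- pv_equiv track=rewrite | github.com/MrBrantCode/unitest_baseline | mut_generate/mist_train_taco/taco_1509/solution.py | can_transform_strings
-- ===== SOURCE A (Python) =====
-- def can_transform_strings(s: str, t: str, queries: list) -> str:
--     def fast_counter(s):
--         a_last, b_count = [0], [0]
--         for c in s:
--             if c == 'A':
--                 a_last.append(a_last[-1] + 1)
--                 b_count.append(b_count[-1])
--             else:
--                 a_last.append(0)
--                 b_count.append(b_count[-1] + 1)
--         return a_last, b_count
--
--     def mask(l, r, info):
--         return info[1][r] - info[1][l], min(r - l, info[0][r])
--
--     def can_transform(from_mask, to_mask):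
--         if from_mask[0] > to_mask[0]:
--             return False
--         elif (to_mask[0] - from_mask[0]) % 2 != 0:
--             return False
--         elif to_mask[0] == from_mask[0]:
--             if to_mask[1] > from_mask[1]:
--                 return False
--             return (from_mask[1] - to_mask[1]) % 3 == 0
--         elif from_mask[0] == 0:
--             return to_mask[1] < from_mask[1]
--         else:
--             return to_mask[1] <= from_mask[1]
--
--     s_info, t_info = fast_counter(s), fast_counter(t)
--     answer = ''
--     for (l1, r1, l2, r2) in queries:
--         l1, l2 = l1 - 1, l2 - 1
--         from_mask = mask(l1, r1, s_info)
--         to_mask = mask(l2, r2, t_info)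
--         if can_transform(from_mask, to_mask):
--             answer += '1'
--         else:
--             answer += '0'
--     return answer
-- ===== SOURCE B (Python) =====
-- def can_transform_strings(s: str, t: str, queries: list) -> str:
--     # Answer each query by a single direct scan of its window: count the
--     # non-'A' characters and keep a running trailing-'A' counter; no prefix arrays.
--     def win_mask(u, l, r):
--         b = 0
--         a = 0
--         for i in range(l - 1, r):
--             if u[i] == 'A':
--                 a += 1
--             else:
--                 a = 0
--                 b += 1
--         return b, a
--
--     out = []
--     for (l1, r1, l2, r2) in queries:
--         fb, fa = win_mask(s, l1, r1)
--         tb, ta = win_mask(t, l2, r2)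
--         if fb > tb:
--             ok = False
--         elif (tb - fb) % 2 != 0:
--             ok = False
--         elif tb == fb:
--             ok = (ta <= fa) and (fa - ta) % 3 == 0
--         elif fb == 0:
--             ok = ta < fa
--         else:
--             ok = ta <= fa
--         out.append('1' if ok else '0')
--     return ''.join(out)
-- ===== Notes on version B (the rewrite author's own statement) =====
-- stated objective: alternative
-- what changed: Dropped the O(|s|+|t|) prefix-array precomputation (a_last/b_count) entirely; each query is answered by one direct forward scan of its two windows that counts non-'A' characters and keeps a running trailing-'A' counter, then applies the same feasibility condition tree.
-- outside the precondition, e.g. on can_transform_strings('AB', 'B', [(0, 1, 1, 1)]): A returns '1', B returns '0'; on can_transform_strings('A', 'AA', [(2, 0, 3, 2)]): A returns '0', B returns '1'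
import Mathlib
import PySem

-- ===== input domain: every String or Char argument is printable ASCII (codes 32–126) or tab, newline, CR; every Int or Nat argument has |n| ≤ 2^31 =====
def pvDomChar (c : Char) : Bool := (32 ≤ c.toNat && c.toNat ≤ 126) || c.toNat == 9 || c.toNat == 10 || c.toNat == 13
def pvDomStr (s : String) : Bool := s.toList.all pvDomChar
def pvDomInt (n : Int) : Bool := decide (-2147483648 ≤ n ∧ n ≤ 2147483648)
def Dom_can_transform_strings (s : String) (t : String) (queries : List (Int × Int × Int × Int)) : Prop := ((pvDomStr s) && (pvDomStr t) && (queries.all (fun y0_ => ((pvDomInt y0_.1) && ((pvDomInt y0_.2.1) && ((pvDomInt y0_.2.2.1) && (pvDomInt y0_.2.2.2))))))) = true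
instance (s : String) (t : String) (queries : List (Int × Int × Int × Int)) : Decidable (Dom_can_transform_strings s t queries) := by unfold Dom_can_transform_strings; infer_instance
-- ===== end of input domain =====

-- B replaces A's prefix-array precomputation by a direct scan of each query window (alternative decomposition, not claimed faster).

-- ===== PORT A =====
-- fast_counter: the two prefix lists built by appending; a_last/b_count are nonempty
-- throughout, so the '[-1]' access never raises and the defaulted pyGetD is exact here.
def ctsFastCounter (cs : List Char) : List Int × List Int :=
  cs.foldl (fun (st : List Int × List Int) c =>
    if c == 'A' then
      (st.1 ++ [PySem.List.pyGetD st.1 (-1) 0 + 1], st.2 ++ [PySem.List.pyGetD st.2 (-1) 0])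
    else
      (st.1 ++ [(0 : Int)], st.2 ++ [PySem.List.pyGetD st.2 (-1) 0 + 1])) ([0], [0])

-- mask(l, r, info); under Pre_ all indices are in range, so the defaulted pyGetD is exact.
def ctsMask (l r : Int) (info : List Int × List Int) : Int × Int :=
  (PySem.List.pyGetD info.2 r 0 - PySem.List.pyGetD info.2 l 0,
   min (r - l) (PySem.List.pyGetD info.1 r 0))

def ctsCanTransform (fm tm : Int × Int) : Bool :=
  if fm.1 > tm.1 then false
  else if PySem.Int.mod (tm.1 - fm.1) 2 != 0 then false
  else if tm.1 == fm.1 then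
    (if tm.2 > fm.2 then false else PySem.Int.mod (fm.2 - tm.2) 3 == 0)
  else if fm.1 == 0 then decide (tm.2 < fm.2)
  else decide (tm.2 ≤ fm.2)

def can_transform_strings (s : String) (t : String) (queries : List (Int × Int × Int × Int)) : String :=
  let sInfo := ctsFastCounter s.toList
  let tInfo := ctsFastCounter t.toList
  String.ofList (queries.foldl (fun (ans : List Char) q =>
    let fm := ctsMask (q.1 - 1) q.2.1 sInfo
    let tm := ctsMask (q.2.2.1 - 1) q.2.2.2 tInfo
    ans ++ [if ctsCanTransform fm tm then '1' else '0']) [])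

-- ===== PORT B =====
-- win_mask: one direct scan over the window's index range; the u[i] access is
-- pyGetD (exact wherever Python B returns: under Pre_ every index is in range)
def ctsWinMask (u : List Char) (l r : Int) : Int × Int :=
  (PySem.List.pyRange (l - 1) r 1).foldl
    (fun (st : Int × Int) i =>
      if PySem.List.pyGetD u i ' ' == 'A' then (st.1, st.2 + 1) else (st.1 + 1, 0))
    ((0 : Int), (0 : Int))

def ctsOk (fm tm : Int × Int) : Bool :=
  if fm.1 > tm.1 then false
  else if PySem.Int.mod (tm.1 - fm.1) 2 != 0 then false
  else if tm.1 == fm.1 then decide (tm.2 ≤ fm.2) && (PySem.Int.mod (fm.2 - tm.2) 3 == 0)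
  else if fm.1 == 0 then decide (tm.2 < fm.2)
  else decide (tm.2 ≤ fm.2)

def can_transform_strings_alt (s : String) (t : String) (queries : List (Int × Int × Int × Int)) : String :=
  String.ofList (queries.foldl (fun (out : List Char) q =>
    let fm := ctsWinMask s.toList q.1 q.2.1
    let tm := ctsWinMask t.toList q.2.2.1 q.2.2.2
    out ++ [if ctsOk fm tm then '1' else '0']) [])

-- ===== PRECONDITION & SPEC =====
-- Pre_ restricts every query to an in-bounds 1-based window (1 ≤ l and l-1 ≤ r ≤ length),
-- the task's natural domain; outside it A raises IndexError or returns values produced by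
-- Python's negative-index wraparound / negative window lengths, accidents of the prefix
-- arrays' indexing.
def Pre_can_transform_strings (s : String) (t : String) (queries : List (Int × Int × Int × Int)) : Prop :=
  ∀ q ∈ queries,
    1 ≤ q.1 ∧ q.1 - 1 ≤ q.2.1 ∧ q.2.1 ≤ (s.toList.length : Int) ∧
    1 ≤ q.2.2.1 ∧ q.2.2.1 - 1 ≤ q.2.2.2 ∧ q.2.2.2 ≤ (t.toList.length : Int)
instance (s : String) (t : String) (queries : List (Int × Int × Int × Int)) : Decidable (Pre_can_transform_strings s t queries) := by unfold Pre_can_transform_strings; infer_instance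

def pvWitness_can_transform_strings : String × String × (List (Int × Int × Int × Int)) :=
  ("AB", "B", [(1, 2, 1, 1)])

def Spec_can_transform_strings (s : String) (t : String) (queries : List (Int × Int × Int × Int)) (out : String) : Prop := out = can_transform_strings_alt s t queries
instance (s : String) (t : String) (queries : List (Int × Int × Int × Int)) (out : String) : Decidable (Spec_can_transform_strings s t queries out) := by unfold Spec_can_transform_strings; infer_instance

-- ===== CLAIM (what is proved, stated in full; the proofs are below) =====
def Claim_equal_can_transform_strings : Prop := ∀ (s : String) (t : String) (queries : List (Int × Int × Int × Int)), Dom_can_transform_strings s t queries → Pre_can_transform_strings s t queries → Spec_can_transform_strings s t queries (can_transform_strings s t queries)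

-- ===== LEMMAS AND PROOFS =====

-- trailing-'A' run of a list (specification helper used only by the proofs)
def ctsTrail : List Char → Int
  | [] => 0
  | c :: rest => if c != 'A' then 0 else ctsTrail rest + 1

-- the trailing run is the takeWhile length
lemma ctsTrail_eq_takeWhile (l : List Char) :
    ctsTrail l = ((l.takeWhile (fun c => c == 'A')).length : Int) := by
  induction l with
  | nil => simp [ctsTrail]
  | cons c rest ih =>
    by_cases h : c = 'A' <;> simp [ctsTrail, h, ih]

-- trailing run of a prefix of p, capped: ctsTrail (p.take k) = min k (ctsTrail p)
lemma ctsTrail_take (p : List Char) (k : Nat) :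
    ctsTrail (p.take k) = min (k : Int) (ctsTrail p) := by
  rw [ctsTrail_eq_takeWhile, ctsTrail_eq_takeWhile, ← List.take_takeWhile,
      List.length_take]
  omega

-- characterization of A's fast_counter as prefix tables
lemma fastCounter_eq (cs : List Char) :
    ctsFastCounter cs =
      ((List.range (cs.length + 1)).map (fun i => ctsTrail (cs.take i).reverse),
       (List.range (cs.length + 1)).map (fun i => (((cs.take i).countP (fun c => c != 'A') : Nat) : Int))) := by
  induction cs using List.reverseRecOn with
  | nil => simp [ctsFastCounter, List.range_succ, ctsTrail]
  | append_singleton cs c ih =>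
    have hstep : ctsFastCounter (cs ++ [c]) =
        (fun (st : List Int × List Int) c =>
          if c == 'A' then
            (st.1 ++ [PySem.List.pyGetD st.1 (-1) 0 + 1], st.2 ++ [PySem.List.pyGetD st.2 (-1) 0])
          else
            (st.1 ++ [(0 : Int)], st.2 ++ [PySem.List.pyGetD st.2 (-1) 0 + 1])) (ctsFastCounter cs) c := by
      simp [ctsFastCounter, List.foldl_append]
    have htakei : ∀ i ∈ List.range (cs.length + 1), (cs ++ [c]).take i = cs.take i := fun i hi =>
      List.take_append_of_le_length (by simpa using Nat.lt_succ_iff.mp (List.mem_range.mp hi))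
    have hfull : (cs ++ [c]).take (cs.length + 1) = cs ++ [c] := by
      apply List.take_of_length_le; simp
    have hlen : (cs ++ [c]).length = cs.length + 1 := by simp
    have hR1 : (List.range ((cs ++ [c]).length + 1)).map (fun i => ctsTrail ((cs ++ [c]).take i).reverse)
        = (List.range (cs.length + 1)).map (fun i => ctsTrail (cs.take i).reverse)
          ++ [ctsTrail (c :: cs.reverse)] := by
      rw [hlen, List.range_succ, List.map_append]
      congr 1
      · exact List.map_congr_left (fun i hi => by rw [htakei i hi])
      · simp [hfull]
    have hR2 : (List.range ((cs ++ [c]).length + 1)).map (fun i => ((((cs ++ [c]).take i).countP (fun x => x != 'A') : Nat) : Int))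
        = (List.range (cs.length + 1)).map (fun i => (((cs.take i).countP (fun x => x != 'A') : Nat) : Int))
          ++ [((cs.countP (fun x => x != 'A') : Nat) : Int) + (if c != 'A' then 1 else 0)] := by
      rw [hlen, List.range_succ, List.map_append]
      congr 1
      · exact List.map_congr_left (fun i hi => by rw [htakei i hi])
      · simp [hfull, List.countP_append]
    have hlast1 : PySem.List.pyGetD ((List.range (cs.length + 1)).map (fun i => ctsTrail (cs.take i).reverse)) (-1) 0
        = ctsTrail cs.reverse := by
      rw [List.range_succ, List.map_append]
      simp [PySem.List.pyGetD_neg_one_append_singleton]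
    have hlast2 : PySem.List.pyGetD ((List.range (cs.length + 1)).map (fun i => (((cs.take i).countP (fun x => x != 'A') : Nat) : Int))) (-1) 0
        = ((cs.countP (fun x => x != 'A') : Nat) : Int) := by
      rw [List.range_succ, List.map_append]
      simp [PySem.List.pyGetD_neg_one_append_singleton]
    rw [hstep, ih, hR1, hR2]
    by_cases hc : c = 'A'
    · have hcb : (c == 'A') = true := by simp [hc]
      simp only [hcb, if_true, hlast1, hlast2]
      simp [ctsTrail, hc]
    · have hcb : (c == 'A') = false := by simp [hc]
      simp only [hcb, Bool.false_eq_true, if_false, hlast1, hlast2]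
      simp [ctsTrail, hc]

-- indexing the prefix tables
lemma pyGetD_map_range (f : Nat → Int) (n : Nat) (i : Int) (h0 : 0 ≤ i) (h1 : i ≤ (n : Int)) :
    PySem.List.pyGetD ((List.range (n + 1)).map f) i 0 = f i.toNat := by
  rw [PySem.List.pyGetD_eq_getElem _ 0 h0 (by simp; omega)]
  simp

-- the single window scan computes (non-'A' count, trailing-'A' run) of the window
lemma windowFold_eq (w : List Char) :
    w.foldl (fun (st : Int × Int) c => if c == 'A' then (st.1, st.2 + 1) else (st.1 + 1, 0))
        ((0 : Int), (0 : Int))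
      = (((w.countP (fun c => c != 'A') : Nat) : Int), ctsTrail w.reverse) := by
  induction w using List.reverseRecOn with
  | nil => simp [ctsTrail]
  | append_singleton w c ih =>
    rw [List.foldl_append, ih]
    by_cases hc : c = 'A' <;> simp [hc, ctsTrail, List.countP_append]

-- B's index loop over range(l-1, r) is the window (cs.take r).drop (l-1)
lemma winMask_window (u : List Char) (l r : Int)
    (h1 : 1 ≤ l) (h2 : l - 1 ≤ r) (h3 : r ≤ (u.length : Int)) :
    ctsWinMask u l r
      = (((((u.take r.toNat).drop (l - 1).toNat).countP (fun c => c != 'A') : Nat) : Int),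
         ctsTrail ((u.take r.toNat).drop (l - 1).toNat).reverse) := by
  have hlen : (((u.take r.toNat).length : Nat) : Int) = r := by
    simp only [List.length_take]
    omega
  have hcong : ∀ j ∈ PySem.List.pyRange (l - 1) r, PySem.List.pyGetD u j ' '
      = PySem.List.pyGetD (u.take r.toNat) j ' ' := by
    intro j hj
    obtain ⟨hj1, hj2⟩ := PySem.List.mem_pyRange_one.mp hj
    rw [PySem.List.pyGetD_eq_getElem (i := j) u ' ' (by omega) (by omega)]
    rw [PySem.List.pyGetD_eq_getElem (i := j) (List.take r.toNat u) ' ' (by omega) (by omega)]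
    exact (List.getElem_take).symm
  have hmap : (PySem.List.pyRange (l - 1) r).map (fun j => PySem.List.pyGetD u j ' ')
      = (u.take r.toNat).drop (l - 1).toNat := by
    rw [List.map_congr_left hcong]
    conv_lhs => rw [show PySem.List.pyRange (l - 1) r
      = PySem.List.pyRange (l - 1) (((u.take r.toNat).length : Nat) : Int) from by rw [hlen]]
    exact PySem.List.map_pyGetD_pyRange' (a := l - 1) _ _ (by omega)
  unfold ctsWinMask
  rw [← hmap, ← windowFold_eq]
  exact (List.foldl_map (f := fun j => PySem.List.pyGetD u j ' ')
    (g := fun (st : Int × Int) c => if c == 'A' then (st.1, st.2 + 1) else (st.1 + 1, 0))).symm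

-- the per-window equality: A's mask over the prefix tables = B's direct window scan
lemma mask_eq_winMask (cs : List Char) (l r : Int)
    (h1 : 1 ≤ l) (h2 : l - 1 ≤ r) (h3 : r ≤ (cs.length : Int)) :
    ctsMask (l - 1) r (ctsFastCounter cs) = ctsWinMask cs l r := by
  have hab : (l - 1).toNat ≤ r.toNat := by omega
  have hbn : r.toNat ≤ cs.length := by omega
  rw [fastCounter_eq, winMask_window cs l r h1 h2 h3]
  unfold ctsMask
  rw [pyGetD_map_range _ _ _ (by omega) (by omega),
      pyGetD_map_range _ _ _ (by omega) (by omega),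
      pyGetD_map_range _ _ _ (by omega) (by omega)]
  simp only [Prod.mk.injEq]
  constructor
  · -- b-count: prefix difference = window count
    have hsplit : cs.take r.toNat = cs.take (l - 1).toNat ++ (cs.take r.toNat).drop (l - 1).toNat := by
      conv_lhs => rw [← List.take_append_drop (l - 1).toNat (cs.take r.toNat)]
      rw [List.take_take, Nat.min_eq_left hab]
    have hc : (cs.take r.toNat).countP (fun c => c != 'A')
        = (cs.take (l - 1).toNat).countP (fun c => c != 'A')
          + ((cs.take r.toNat).drop (l - 1).toNat).countP (fun c => c != 'A') := by
      conv_lhs => rw [hsplit]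
      rw [List.countP_append]
    rw [hc]
    push_cast
    ring
  · -- trailing-A: min(window length, run ending at r)
    rw [List.reverse_drop, List.length_take, Nat.min_eq_left hbn, ctsTrail_take]
    have hcast : ((r.toNat - (l - 1).toNat : Nat) : Int) = r - (l - 1) := by omega
    rw [hcast]

-- the two condition trees agree
lemma canTransform_eq_ok (fm tm : Int × Int) : ctsCanTransform fm tm = ctsOk fm tm := by
  unfold ctsCanTransform ctsOk
  by_cases h : tm.2 ≤ fm.2
  · have h' : ¬ fm.2 < tm.2 := not_lt.mpr h
    simp [h, h']
  · have h' : fm.2 < tm.2 := not_le.mp h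
    simp [h, h']

-- ===== VERDICT (by name: the statement is the Claim_ definition above) =====
theorem can_transform_strings_spec : Claim_equal_can_transform_strings := by
  intro s t queries _hdom hpre
  unfold Spec_can_transform_strings can_transform_strings can_transform_strings_alt
  simp only [PySem.List.foldl_append_singleton_eq_map, List.nil_append]
  congr 1
  apply List.map_congr_left
  intro q hq
  obtain ⟨h1, h2, h3, h4, h5, h6⟩ := hpre q hq
  rw [mask_eq_winMask s.toList q.1 q.2.1 h1 h2 h3,
      mask_eq_winMask t.toList q.2.2.1 q.2.2.2 h4 h5 h6,
      canTransform_eq_ok]
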